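-- pv_equiv track=rewrite | github.com/KhaledMohamed118/Sales-Reports-Maker | ElManar-Office.py | notnumber
-- ===== SOURCE A (Python) =====
-- def notnumber(stri):
--     x = 0
--     dots = 0
--
--     for i in stri:
--         if i == '.':
--             dots += 1
--         elif i > '9' or i < '0':
--             x = 1
--             break
--     if dots > 1 or x > 0:
--         return True
--     else:
--         return False
-- ===== SOURCE B (Python) =====
-- def notnumber(stri):
--     # A string is a number iff deleting every ASCII digit leaves "" or ".".
--     residue = ''.join(c for c in stri if not ('0' <= c <= '9'))
--     return residue not in ('', '.')
-- ===== Notes on version B (the rewrite author's own statement) =====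
-- stated objective: simpler
-- what changed: Instead of scanning with a mutable flag and dot counter, B deletes every ASCII digit and decides by pattern-matching the residue: the input is a number exactly when the residue is empty or a single dot.
import Mathlib
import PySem

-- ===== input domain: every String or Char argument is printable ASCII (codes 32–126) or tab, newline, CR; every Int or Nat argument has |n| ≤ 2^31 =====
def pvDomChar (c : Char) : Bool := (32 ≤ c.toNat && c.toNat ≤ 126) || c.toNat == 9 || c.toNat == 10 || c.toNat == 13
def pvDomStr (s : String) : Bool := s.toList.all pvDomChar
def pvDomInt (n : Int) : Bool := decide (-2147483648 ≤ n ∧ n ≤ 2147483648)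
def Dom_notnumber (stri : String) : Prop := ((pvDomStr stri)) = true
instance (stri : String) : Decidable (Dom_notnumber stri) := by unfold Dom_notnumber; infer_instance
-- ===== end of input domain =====

-- B replaces A's stateful scan (flag, dot counter, early break) by deleting every ASCII digit
-- and pattern-matching the residue: the input is a number iff the residue is "" or ".".

-- ===== PORT A =====
-- the for-loop with early break: state (x, dots)
def notnumberLoop : List Char → Int → Int → Int × Int
  | [], x, dots => (x, dots)
  | i :: rest, x, dots =>
    if i = '.' then notnumberLoop rest x (dots + 1)
    else if '9' < i ∨ i < '0' then (1, dots)   -- x = 1; break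
    else notnumberLoop rest x dots

def notnumber (stri : String) : Bool :=
  let (x, dots) := notnumberLoop stri.toList 0 0
  if dots > 1 ∨ x > 0 then true else false

-- ===== PORT B =====
def notnumber_alt (stri : String) : Bool :=
  let residue := stri.toList.filter (fun c => !('0' ≤ c && c ≤ '9'))
  !(residue = [] || residue = ['.'])

-- ===== PRECONDITION & SPEC =====
def Spec_notnumber (stri : String) (out : Bool) : Prop := out = notnumber_alt stri
instance (stri : String) (out : Bool) : Decidable (Spec_notnumber stri out) := by unfold Spec_notnumber; infer_instance

-- ===== CLAIM (what is proved, stated in full; the proofs are below) =====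
def Claim_equal_notnumber : Prop := ∀ (stri : String), Dom_notnumber stri → Spec_notnumber stri (notnumber stri)

-- ===== LEMMAS AND PROOFS =====

-- Loop invariant: the loop's verdict, with `dots` already counted, matches the residue test
-- shifted by `dots` (a residue of [] still passes with dots ≤ 1, of ['.'] only with dots = 0).
theorem notnumberLoop_key (l : List Char) (dots : Int) (h : 0 ≤ dots) :
    ((notnumberLoop l 0 dots).2 > 1 ∨ (notnumberLoop l 0 dots).1 > 0) ↔
      ¬((dots = 0 ∧ (l.filter (fun c => !('0' ≤ c && c ≤ '9')) = [] ∨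
                     l.filter (fun c => !('0' ≤ c && c ≤ '9')) = ['.'])) ∨
        (dots = 1 ∧ l.filter (fun c => !('0' ≤ c && c ≤ '9')) = [])) := by
  induction l generalizing dots with
  | nil =>
    simp only [notnumberLoop, List.filter_nil]
    simp only [reduceCtorEq, or_false, and_true]
    omega
  | cons c rest ih =>
    by_cases hdot : c = '.'
    · subst hdot
      rw [notnumberLoop, if_pos rfl]
      have hr : (('.' :: rest).filter (fun c => !('0' ≤ c && c ≤ '9'))) =
          '.' :: rest.filter (fun c => !('0' ≤ c && c ≤ '9')) := by
        rw [List.filter_cons, if_pos (by decide)]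
      rw [hr, ih (dots + 1) (by omega)]
      constructor
      · intro hc hc'
        apply hc
        rcases hc' with ⟨h0, hres⟩ | ⟨h1, hres⟩
        · rcases hres with hres | hres
          · simp at hres
          · right; exact ⟨by omega, by simpa using hres⟩
        · simp at hres
      · intro hc hc'
        apply hc
        rcases hc' with ⟨h0, _⟩ | ⟨h1, hres⟩
        · omega
        · left; exact ⟨by omega, Or.inr (by rw [hres])⟩
    · by_cases hbad : '9' < c ∨ c < '0'
      · rw [notnumberLoop, if_neg hdot, if_pos hbad]
        have hr : ((c :: rest).filter (fun c => !('0' ≤ c && c ≤ '9'))) =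
            c :: rest.filter (fun c => !('0' ≤ c && c ≤ '9')) := by
          rw [List.filter_cons, if_pos]
          simp only [Bool.not_eq_true', Bool.and_eq_false_iff, decide_eq_false_iff_not, not_le]
          rcases hbad with hb | hb
          exacts [Or.inr hb, Or.inl hb]
        constructor
        · intro _ hc
          rw [hr] at hc
          rcases hc with ⟨_, hres | hres⟩ | ⟨_, hres⟩
          · simp at hres
          · rw [List.cons.injEq] at hres; exact hdot hres.1
          · simp at hres
        · intro _; right; norm_num
      · rw [notnumberLoop, if_neg hdot, if_neg hbad]
        have hr : ((c :: rest).filter (fun c => !('0' ≤ c && c ≤ '9'))) =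
            rest.filter (fun c => !('0' ≤ c && c ≤ '9')) := by
          rw [not_or, not_lt, not_lt] at hbad
          rw [List.filter_cons, if_neg]
          simp [hbad.1, hbad.2]
        rw [hr]
        exact ih dots h

-- ===== VERDICT (by name: the statement is the Claim_ definition above) =====
theorem notnumber_spec : Claim_equal_notnumber := by
  intro stri _
  unfold Spec_notnumber notnumber notnumber_alt
  have key := notnumberLoop_key stri.toList 0 le_rfl
  set r := stri.toList.filter (fun c => !('0' ≤ c && c ≤ '9')) with hr
  by_cases hres : r = [] ∨ r = ['.']
  · have : ¬((notnumberLoop stri.toList 0 0).2 > 1 ∨ (notnumberLoop stri.toList 0 0).1 > 0) := by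
      rw [key]
      exact not_not.mpr (Or.inl ⟨rfl, hres⟩)
    simp only [if_neg this]
    rcases hres with h | h <;> simp [h]
  · have : ((notnumberLoop stri.toList 0 0).2 > 1 ∨ (notnumberLoop stri.toList 0 0).1 > 0) := by
      rw [key]
      rintro (⟨_, h⟩ | ⟨h1, _⟩)
      · exact hres h
      · omega
    simp only [if_pos this]
    rw [not_or] at hres
    simp [hres.1, hres.2]
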